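-- pv_equiv track=rewrite | github.com/ht0628/leetcode | Python/test.py | calDPDScore
-- ===== SOURCE A (Python) =====
-- def calDPDScore(dpdInfo):
--     maxDpdLevel = 0
--     layTime = 0
--     for dpd in dpdInfo:
--         if dpd == 'Y':
--             layTime += 1
--             if 0<layTime<=3:
--                 maxDpdLevel = max(maxDpdLevel,1)
--             elif 3<layTime<=7:
--                 maxDpdLevel = max(maxDpdLevel,2)
--             else:
--                 maxDpdLevel = max(maxDpdLevel,3)
--         elif dpd == 'N':
--             layTime = 0
--     if maxDpdLevel == 1: return -10
--     elif maxDpdLevel == 2: return -15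
--     elif maxDpdLevel == 3: return -25
--     else: return 0
-- ===== SOURCE B (Python) =====
-- def calDPDScore(dpdInfo):
--     # split the sequence on 'N' into segments, count 'Y' per segment, map the max once
--     segs = []
--     cur = []
--     for d in dpdInfo:
--         if d == 'N':
--             segs.append(cur)
--             cur = []
--         else:
--             cur.append(d)
--     segs.append(cur)
--     m = max(seg.count('Y') for seg in segs)
--     return 0 if m == 0 else (-10 if m <= 3 else (-15 if m <= 7 else -25))
-- ===== Notes on version B (the rewrite author's own statement) =====
-- stated objective: alternative
-- what changed: Replaces A's per-element accumulator that tracks both a running run length and a running severity level with a split-on-'N'-into-segments pass, a per-segment 'Y' count, a single max, and one final threshold mapping.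
import Mathlib
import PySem

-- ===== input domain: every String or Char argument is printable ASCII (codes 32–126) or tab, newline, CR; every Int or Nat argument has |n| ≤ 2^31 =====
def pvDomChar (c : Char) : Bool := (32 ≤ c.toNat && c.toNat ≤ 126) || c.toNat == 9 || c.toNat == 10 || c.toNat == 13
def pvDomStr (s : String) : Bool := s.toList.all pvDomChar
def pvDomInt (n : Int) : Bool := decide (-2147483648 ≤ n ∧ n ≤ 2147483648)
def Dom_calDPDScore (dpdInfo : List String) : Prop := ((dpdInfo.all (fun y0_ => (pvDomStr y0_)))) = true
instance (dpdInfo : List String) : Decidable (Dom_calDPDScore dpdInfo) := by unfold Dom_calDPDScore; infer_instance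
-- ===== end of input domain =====

-- B replaces A's per-element run/level accumulator with split-on-'N' segments, a per-segment 'Y' count, one max and one final threshold mapping (alternative decomposition, same O(n)).

-- ===== PORT A =====
def aStep (st : Int × Int) (dpd : String) : Int × Int :=
  if dpd = "Y" then
    let layTime := st.2 + 1
    if 0 < layTime ∧ layTime ≤ 3 then (max st.1 1, layTime)
    else if 3 < layTime ∧ layTime ≤ 7 then (max st.1 2, layTime)
    else (max st.1 3, layTime)
  else if dpd = "N" then (st.1, 0)
  else st

def calDPDScore (dpdInfo : List String) : Int :=
  let st := dpdInfo.foldl aStep (0, 0)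
  if st.1 = 1 then -10
  else if st.1 = 2 then -15
  else if st.1 = 3 then -25
  else 0

-- ===== PORT B =====
def bStep (st : List (List String) × List String) (d : String) : List (List String) × List String :=
  if d = "N" then (st.1 ++ [st.2], [])
  else (st.1, st.2 ++ [d])

def calDPDScore_alt (dpdInfo : List String) : Int :=
  let st := dpdInfo.foldl bStep ([], [])
  let segs := st.1 ++ [st.2]
  let counts := segs.map (fun seg => (PySem.List.count seg "Y" : Int))
  -- max(generator): counts is nonempty by construction, so the default is never used
  let m := (PySem.List.max? counts (fun y => y)).getD 0
  if m = 0 then 0 else if m ≤ 3 then -10 else if m ≤ 7 then -15 else -25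

-- ===== PRECONDITION & SPEC =====
def Spec_calDPDScore (dpdInfo : List String) (out : Int) : Prop := out = calDPDScore_alt dpdInfo
instance (dpdInfo : List String) (out : Int) : Decidable (Spec_calDPDScore dpdInfo out) := by unfold Spec_calDPDScore; infer_instance

-- ===== CLAIM (what is proved, stated in full; the proofs are below) =====
def Claim_equal_calDPDScore : Prop := ∀ (dpdInfo : List String), Dom_calDPDScore dpdInfo → Spec_calDPDScore dpdInfo (calDPDScore dpdInfo)

-- ===== LEMMAS AND PROOFS =====

-- severity level of a run length (0 for no run)
def lvlOf (t : Int) : Int := if t ≤ 0 then 0 else if t ≤ 3 then 1 else if t ≤ 7 then 2 else 3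

-- max over m, the current partial segment count c, and the 'Y'-counts of the remaining segments
def msc : List String → Int → Int → Int
  | [], m, c => max m c
  | d :: l, m, c => if d = "Y" then msc l m (c + 1) else if d = "N" then msc l (max m c) 0 else msc l m c

theorem msc_ge (l : List String) : ∀ m c : Int, m ≤ msc l m c ∧ c ≤ msc l m c := by
  induction l with
  | nil => intro m c; exact ⟨le_max_left _ _, le_max_right _ _⟩
  | cons d l ih =>
    intro m c
    simp only [msc]
    split_ifs
    · exact ⟨(ih m (c + 1)).1, le_trans (by omega) (ih m (c + 1)).2⟩
    · exact ⟨le_trans (le_max_left _ _) (ih (max m c) 0).1,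
             le_trans (le_max_right _ _) (ih (max m c) 0).1⟩
    · exact ih m c

theorem msc_max (l : List String) : ∀ m c : Int, 0 ≤ c → msc l m c = max m (msc l 0 c) := by
  induction l with
  | nil => intro m c hc; simp [msc]; omega
  | cons d l ih =>
    intro m c hc
    simp only [msc]
    split_ifs with h1 h2
    · exact ih m (c + 1) (by omega)
    · rw [ih (max m c) 0 le_rfl, ih (max 0 c) 0 le_rfl]; omega
    · exact ih m c hc

theorem lvl_mono {a b : Int} (h : a ≤ b) : lvlOf a ≤ lvlOf b := by
  simp only [lvlOf]; split_ifs <;> omega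

theorem lvl_max (a b : Int) : lvlOf (max a b) = max (lvlOf a) (lvlOf b) := by
  rcases le_total a b with h | h
  · rw [max_eq_right h, max_eq_right (lvl_mono h)]
  · rw [max_eq_left h, max_eq_left (lvl_mono h)]

theorem lvl_nonneg (a : Int) : 0 ≤ lvlOf a := by simp only [lvlOf]; split_ifs <;> omega

theorem aStep_Y (v t : Int) (ht : 0 ≤ t) : aStep (v, t) "Y" = (max v (lvlOf (t + 1)), t + 1) := by
  simp only [aStep, lvlOf]
  split_ifs <;> first | rfl | omega

theorem lvl_zero : lvlOf 0 = 0 := by simp [lvlOf]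

theorem a_fold (l : List String) :
    ∀ v t : Int, 0 ≤ t → lvlOf t ≤ v →
      (l.foldl aStep (v, t)).1 = max v (lvlOf (msc l 0 t)) := by
  induction l with
  | nil =>
    intro v t ht hv
    simp only [List.foldl_nil, msc]
    rw [max_eq_right ht, max_eq_left hv]
  | cons d l ih =>
    intro v t ht hv
    by_cases hY : d = "Y"
    · subst hY
      rw [List.foldl_cons, aStep_Y v t ht,
          ih (max v (lvlOf (t + 1))) (t + 1) (by omega) (le_max_right _ _)]
      have hmsc : msc ("Y" :: l) 0 t = msc l 0 (t + 1) := by simp [msc]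
      rw [hmsc]
      have h1 : lvlOf (t + 1) ≤ lvlOf (msc l 0 (t + 1)) := lvl_mono (msc_ge l 0 (t + 1)).2
      omega
    · by_cases hN : d = "N"
      · subst hN
        rw [List.foldl_cons]
        have hstep : aStep (v, t) "N" = (v, 0) := by simp [aStep]
        have h0v : lvlOf 0 ≤ v := by rw [lvl_zero]; have := lvl_nonneg t; omega
        rw [hstep, ih v 0 le_rfl h0v]
        have hmsc : msc ("N" :: l) 0 t = msc l (max 0 t) 0 := by simp [msc]
        rw [hmsc, max_eq_right ht, msc_max l t 0 le_rfl, lvl_max]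
        omega
      · rw [List.foldl_cons]
        have hstep : aStep (v, t) d = (v, t) := by simp [aStep, hY, hN]
        have hmsc : msc (d :: l) 0 t = msc l 0 t := by simp [msc, hY, hN]
        rw [hstep, ih v t ht hv, hmsc]

-- B-side: the fold splits the list into segments
def spSegs : List String → List String → List (List String)
  | [], _ => []
  | d :: l, cur => if d = "N" then cur :: spSegs l [] else spSegs l (cur ++ [d])

def spCur : List String → List String → List String
  | [], cur => cur
  | d :: l, cur => if d = "N" then spCur l [] else spCur l (cur ++ [d])

theorem b_fold (l : List String) :
    ∀ (segs : List (List String)) (cur : List String),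
      l.foldl bStep (segs, cur) = (segs ++ spSegs l cur, spCur l cur) := by
  induction l with
  | nil => intro segs cur; simp [spSegs, spCur]
  | cons d l ih =>
    intro segs cur
    by_cases hN : d = "N"
    · subst hN
      rw [List.foldl_cons]
      have : bStep (segs, cur) "N" = (segs ++ [cur], []) := by simp [bStep]
      rw [this, ih]
      simp [spSegs, spCur]
    · rw [List.foldl_cons]
      have : bStep (segs, cur) d = (segs, cur ++ [d]) := by simp [bStep, hN]
      rw [this, ih]
      simp [spSegs, spCur, hN]

def cnt (seg : List String) : Int := (PySem.List.count seg "Y" : Int)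

theorem cnt_nonneg (seg : List String) : 0 ≤ cnt seg := by
  simp [cnt]

theorem cnt_append (cur : List String) (d : String) :
    cnt (cur ++ [d]) = cnt cur + (if d = "Y" then 1 else 0) := by
  by_cases hY : d = "Y"
  · subst hY; simp [cnt]
  · simp [cnt, hY]

theorem foldl_max_seg (l : List String) :
    ∀ (cur : List String) (a : Int),
      List.foldl max a ((spSegs l cur ++ [spCur l cur]).map cnt) = max a (msc l 0 (cnt cur)) := by
  induction l with
  | nil =>
    intro cur a
    simp [spSegs, spCur, msc, max_eq_right (cnt_nonneg cur)]
  | cons d l ih =>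
    intro cur a
    by_cases hN : d = "N"
    · subst hN
      have hsp : spSegs ("N" :: l) cur = cur :: spSegs l [] := by simp [spSegs]
      have hcu : spCur ("N" :: l) cur = spCur l [] := by simp [spCur]
      have hmsc : msc ("N" :: l) 0 (cnt cur) = msc l (max 0 (cnt cur)) 0 := by simp [msc]
      rw [hsp, hcu, List.cons_append, List.map_cons, List.foldl_cons, ih [] (max a (cnt cur)),
          hmsc, msc_max l (max 0 (cnt cur)) 0 le_rfl]
      have h0 : cnt ([] : List String) = 0 := by simp [cnt]
      rw [h0]
      have := cnt_nonneg cur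
      omega
    · have hsp : spSegs (d :: l) cur = spSegs l (cur ++ [d]) := by simp [spSegs, hN]
      have hcu : spCur (d :: l) cur = spCur l (cur ++ [d]) := by simp [spCur, hN]
      rw [hsp, hcu, ih (cur ++ [d]) a, cnt_append]
      by_cases hY : d = "Y"
      · simp [msc, hY]
      · simp [msc, hY, hN]

theorem alt_eq (l : List String) :
    calDPDScore_alt l =
      (if msc l 0 0 = 0 then 0 else if msc l 0 0 ≤ 3 then -10 else if msc l 0 0 ≤ 7 then -15 else -25) := by
  simp only [calDPDScore_alt]
  rw [b_fold l [] []]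
  simp only [List.nil_append]
  have hval :
      (PySem.List.max? ((spSegs l [] ++ [spCur l []]).map (fun seg => (PySem.List.count seg "Y" : Int)))
          (fun y => y)).getD 0 = msc l 0 0 := by
    obtain ⟨x, t, hxt⟩ :
        ∃ x t, (spSegs l [] ++ [spCur l []]).map (fun seg => (PySem.List.count seg "Y" : Int)) = x :: t := by
      cases h : (spSegs l [] ++ [spCur l []]).map (fun seg => (PySem.List.count seg "Y" : Int)) with
      | nil =>
        exfalso
        have := congrArg List.length h
        simp at this
      | cons x t => exact ⟨x, t, rfl⟩
    rw [hxt, PySem.List.max?_id_cons]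
    simp only [Option.getD_some]
    have hmap : (spSegs l [] ++ [spCur l []]).map cnt = x :: t := by simpa [cnt] using hxt
    have hx : 0 ≤ x := by
      have hmem : x ∈ (spSegs l [] ++ [spCur l []]).map cnt := by rw [hmap]; exact List.mem_cons_self
      obtain ⟨s, _, hs⟩ := List.mem_map.mp hmem
      rw [← hs]; exact cnt_nonneg s
    have hfold : t.foldl max x = List.foldl max 0 (x :: t) := by
      rw [List.foldl_cons, max_eq_right hx]
    have h0 : cnt ([] : List String) = 0 := by simp [cnt]
    rw [hfold, ← hmap, foldl_max_seg l [] 0, h0, max_eq_right (msc_ge l 0 0).2]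
  simp only [hval]

-- ===== VERDICT (by name: the statement is the Claim_ definition above) =====
theorem calDPDScore_spec : Claim_equal_calDPDScore := by
  intro l _
  unfold Spec_calDPDScore
  rw [alt_eq l]
  simp only [calDPDScore]
  have ha := a_fold l 0 0 le_rfl (by rw [lvl_zero])
  rw [ha]
  have hM := (msc_ge l 0 0).2
  simp only [lvlOf]
  split_ifs <;> omega
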